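-- pv_equiv track=rewrite | github.com/Ivan-49/YandexLyceumPython2024 | Вложенные циклы/Сумма степеней.py | sum_steps
-- ===== SOURCE A (Python) =====
-- def sum_steps(n: int) -> int:
--     res = 0
--     for i in range(1, n + 1):
--         a = 0
--         if i % 2 == 0:
--             for j in range(2, i + 1, 2):
--                 a += j
--         if i % 2 == 1:
--             for j in range(1, i + 1, 2):
--                 a += j
--         res += i**a
--     return res
-- ===== SOURCE B (Python) =====
-- def sum_steps(n: int) -> int:
--     res = 0
--     for i in range(1, n + 1):
--         if i % 2 == 0:
--             k = i // 2
--             a = k * (k + 1)          # closed form for 2+4+...+i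
--         else:
--             m = (i + 1) // 2
--             a = m * m                # closed form for 1+3+...+i
--         res += i ** a
--     return res
-- ===== Notes on version B (the rewrite author's own statement) =====
-- stated objective: simpler
-- what changed: The two inner even/odd summation loops are replaced by closed-form formulas (k*(k+1) and m*m), leaving a single loop; runtime is dominated by the bignum powers, so no measured speedup.
import Mathlib
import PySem

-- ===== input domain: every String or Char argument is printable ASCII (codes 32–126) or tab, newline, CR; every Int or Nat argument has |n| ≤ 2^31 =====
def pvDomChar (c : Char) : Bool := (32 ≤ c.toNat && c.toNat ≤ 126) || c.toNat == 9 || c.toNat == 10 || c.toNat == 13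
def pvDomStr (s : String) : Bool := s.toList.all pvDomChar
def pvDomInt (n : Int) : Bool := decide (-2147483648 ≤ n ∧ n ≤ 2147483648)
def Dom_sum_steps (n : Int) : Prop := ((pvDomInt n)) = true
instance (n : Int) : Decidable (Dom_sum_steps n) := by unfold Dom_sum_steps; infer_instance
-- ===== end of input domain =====

-- B replaces the two inner even/odd summation loops by closed-form formulas (k*(k+1), m*m): simpler, one loop.

-- ===== PORT A =====
def sum_steps (n : Int) : Int :=
  (PySem.List.pyRange 1 (n + 1) 1).foldl (fun res i =>
    let a : Int := 0
    let a := if PySem.Int.mod i 2 == 0 then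
        (PySem.List.pyRange 2 (i + 1) 2).foldl (fun a j => a + j) a
      else a
    let a := if PySem.Int.mod i 2 == 1 then
        (PySem.List.pyRange 1 (i + 1) 2).foldl (fun a j => a + j) a
      else a
    res + i ^ a.toNat) 0

-- ===== PORT B =====
def sum_steps_alt (n : Int) : Int :=
  (PySem.List.pyRange 1 (n + 1) 1).foldl (fun res i =>
    let a : Int :=
      if PySem.Int.mod i 2 == 0 then
        let k := PySem.Int.floordiv i 2
        k * (k + 1)
      else
        let m := PySem.Int.floordiv (i + 1) 2
        m * m
    res + i ^ a.toNat) 0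

-- ===== PRECONDITION & SPEC =====
def Spec_sum_steps (n : Int) (out : Int) : Prop := out = sum_steps_alt n
instance (n : Int) (out : Int) : Decidable (Spec_sum_steps n out) := by unfold Spec_sum_steps; infer_instance

-- ===== CLAIM (what is proved, stated in full; the proofs are below) =====
def Claim_equal_sum_steps : Prop := ∀ (n : Int), Dom_sum_steps n → Spec_sum_steps n (sum_steps n)

-- ===== LEMMAS AND PROOFS =====

-- sum of 2+2t for t < k
lemma pvFoldEven (k : Nat) :
    ((List.range k).map (fun t : Nat => (2 : Int) + 2 * (t : Int))).foldl (fun a j => a + j) 0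
      = (k : Int) * (k + 1) := by
  induction k with
  | zero => simp
  | succ k ih =>
      rw [List.range_succ, List.map_append, List.foldl_append, ih]
      simp only [List.map_cons, List.map_nil, List.foldl_cons, List.foldl_nil]
      push_cast; ring

-- sum of 1+2t for t < m
lemma pvFoldOdd (m : Nat) :
    ((List.range m).map (fun t : Nat => (1 : Int) + 2 * (t : Int))).foldl (fun a j => a + j) 0
      = (m : Int) * m := by
  induction m with
  | zero => simp
  | succ m ih =>
      rw [List.range_succ, List.map_append, List.foldl_append, ih]
      simp only [List.map_cons, List.map_nil, List.foldl_cons, List.foldl_nil]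
      push_cast; ring

lemma pvInnerEven (i : Int) (h1 : 1 ≤ i) (h2 : PySem.Int.mod i 2 = 0) :
    (PySem.List.pyRange 2 (i + 1) 2).foldl (fun a j => a + j) 0
      = PySem.Int.floordiv i 2 * (PySem.Int.floordiv i 2 + 1) := by
  have hdvd : (2 : Int) ∣ i := (PySem.Int.mod_eq_zero_iff_dvd i 2).mp h2
  obtain ⟨k, hk⟩ := hdvd
  have hk1 : 1 ≤ k := by omega
  have hfd : PySem.Int.floordiv i 2 = k := by
    rw [PySem.Int.floordiv_eq_ediv_of_pos (by norm_num)]; omega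
  rw [PySem.List.pyRange_of_pos 2 (i + 1) (by norm_num), hfd]
  have hcnt : (if (2 : Int) < i + 1 then ((i + 1 - 2 + 2 - 1) / 2).toNat else 0) = k.toNat := by
    rw [if_pos (by omega)]
    omega
  rw [hcnt]
  have := pvFoldEven k.toNat
  rw [this]
  have : ((k.toNat : Int)) = k := by omega
  rw [this]

lemma pvInnerOdd (i : Int) (h1 : 1 ≤ i) (h2 : PySem.Int.mod i 2 = 1) :
    (PySem.List.pyRange 1 (i + 1) 2).foldl (fun a j => a + j) 0
      = PySem.Int.floordiv (i + 1) 2 * PySem.Int.floordiv (i + 1) 2 := by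
  have hdvd : (2 : Int) ∣ (i + 1) := by
    have := PySem.Int.mod_eq_zero_iff_dvd (i + 1) 2
    have hm : PySem.Int.mod (i + 1) 2 = 0 := by
      have ha : PySem.Int.mod (i + 1) 2 = (i + 1) % 2 := PySem.Int.mod_eq_emod_of_pos (by norm_num)
      have hb : PySem.Int.mod i 2 = i % 2 := PySem.Int.mod_eq_emod_of_pos (by norm_num)
      omega
    exact this.mp hm
  obtain ⟨m, hm⟩ := hdvd
  have hm1 : 1 ≤ m := by omega
  have hfd : PySem.Int.floordiv (i + 1) 2 = m := by
    rw [PySem.Int.floordiv_eq_ediv_of_pos (by norm_num)]; omega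
  rw [PySem.List.pyRange_of_pos 1 (i + 1) (by norm_num), hfd]
  have hcnt : (if (1 : Int) < i + 1 then ((i + 1 - 1 + 2 - 1) / 2).toNat else 0) = m.toNat := by
    rw [if_pos (by omega)]
    omega
  rw [hcnt]
  have := pvFoldOdd m.toNat
  rw [this]
  have : ((m.toNat : Int)) = m := by omega
  rw [this]

-- ===== VERDICT (by name: the statement is the Claim_ definition above) =====
theorem sum_steps_spec : Claim_equal_sum_steps := by
  intro n _
  unfold Spec_sum_steps sum_steps sum_steps_alt
  apply PySem.List.foldl_congr_mem
  intro res i hi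
  have h1 : 1 ≤ i := (PySem.List.mem_pyRange_one.mp hi).1
  rcases PySem.Int.mod_two_eq i with h | h
  · simp only [h]
    norm_num
    rw [pvInnerEven i h1 h, PySem.Int.floordiv_eq_ediv_of_pos (by norm_num)]
  · simp only [h]
    norm_num
    rw [pvInnerOdd i h1 h, PySem.Int.floordiv_eq_ediv_of_pos (by norm_num)]
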